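-- pv_equiv track=rewrite | github.com/1a3orn/length-generalization | tasks/unary.py | double_other
-- ===== SOURCE A (Python) =====
-- def double_other(text):
--     ret = ""
--     for i, c in enumerate(text):
--         if i % 2 == 0:
--             ret += c
--         else:
--             ret += text[i - 1]
--     return ret
-- ===== SOURCE B (Python) =====
-- def double_other(text):
--     out = []
--     for i in range(0, len(text), 2):
--         out.append(text[i] * 2)
--     return "".join(out)[:len(text)]
-- ===== Notes on version B (the rewrite author's own statement) =====
-- stated objective: faster
-- what changed: Instead of walking every index with a parity branch and concatenating characters onto a string one by one, B walks only the even indices, collects each character doubled into a list, joins once and truncates to len(text).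
import Mathlib
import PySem

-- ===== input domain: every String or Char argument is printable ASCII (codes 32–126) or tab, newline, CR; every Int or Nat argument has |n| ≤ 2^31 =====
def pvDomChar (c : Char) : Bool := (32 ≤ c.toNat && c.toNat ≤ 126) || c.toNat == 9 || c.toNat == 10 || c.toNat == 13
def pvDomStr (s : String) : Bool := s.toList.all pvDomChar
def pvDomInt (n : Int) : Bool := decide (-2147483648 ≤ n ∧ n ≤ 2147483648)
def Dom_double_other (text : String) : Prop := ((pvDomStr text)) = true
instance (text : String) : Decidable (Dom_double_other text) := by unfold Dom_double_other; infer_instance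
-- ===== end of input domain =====

-- B replaces A's per-index parity branch and repeated concatenation by one pass over the even
-- indices only, collecting each kept character doubled, joining once and truncating to len(text).

-- ===== PORT A =====
-- for i, c in enumerate(text): even i → ret += c; odd i → ret += text[i-1]
def double_other (text : String) : String :=
  String.mk ((PySem.List.enumerate text.toList 0).foldl
    (fun ret ic =>
      if PySem.Int.mod ic.1 2 = 0 then ret ++ [ic.2]
      else
        match PySem.List.pyGet? text.toList (ic.1 - 1) with
        | some c => ret ++ [c]
        | none => ret)   -- unreachable: i - 1 is in range whenever i is an odd iteration index
    [])

-- ===== PORT B =====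
-- out = []; for i in range(0, len(text), 2): out.append(text[i] * 2); return "".join(out)[:len(text)]
def double_other_alt (text : String) : String :=
  String.mk
    ((((PySem.List.pyRange 0 (text.toList.length : Int) 2).foldl
        (fun out i =>
          out ++ [[PySem.List.pyGetD text.toList i ' ', PySem.List.pyGetD text.toList i ' ']])
        []).flatten).take text.toList.length)

-- ===== PRECONDITION & SPEC =====
def Spec_double_other (text : String) (out : String) : Prop := out = double_other_alt text
instance (text : String) (out : String) : Decidable (Spec_double_other text out) := by unfold Spec_double_other; infer_instance

-- ===== CLAIM (what is proved, stated in full; the proofs are below) =====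
def Claim_equal_double_other : Prop := ∀ (text : String), Dom_double_other text → Spec_double_other text (double_other text)

-- ===== LEMMAS AND PROOFS =====

-- the common pairwise skeleton: each even-indexed char twice, the last one once if the length is odd
def pvDbl : List Char → List Char
  | [] => []
  | [a] => [a]
  | a :: _ :: t => a :: a :: pvDbl t

-- B's skeleton before truncation: every even-indexed char twice
def pvDblPairs : List Char → List Char
  | [] => []
  | [a] => [a, a]
  | a :: _ :: t => a :: a :: pvDblPairs t

theorem pvDblPairs_take (l : List Char) : (pvDblPairs l).take l.length = pvDbl l := by
  induction l using pvDbl.induct with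
  | case1 => rfl
  | case2 a => rfl
  | case3 a b t ih => simpa [pvDblPairs, pvDbl] using ih

-- pyRange with step 2 peels one element at a time
theorem pvPyRange_two_cons (a b : Int) (h : a < b) :
    PySem.List.pyRange a b 2 = a :: PySem.List.pyRange (a + 2) b 2 := by
  rw [PySem.List.pyRange_of_pos a b (by norm_num),
      PySem.List.pyRange_of_pos (a + 2) b (by norm_num)]
  by_cases h2 : a + 2 < b
  · have hcnt : (if a < b then ((b - a + 2 - 1) / 2).toNat else 0)
        = (if a + 2 < b then ((b - (a + 2) + 2 - 1) / 2).toNat else 0) + 1 := by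
      simp only [if_pos h, if_pos h2]; omega
    rw [hcnt, List.range_succ_eq_map, List.map_cons, List.map_map]
    refine congrArg₂ List.cons (by simp) ?_
    refine List.map_congr_left (fun k _ => ?_)
    simp only [Function.comp_apply]
    push_cast
    ring
  · have hcnt : (if a < b then ((b - a + 2 - 1) / 2).toNat else 0) = 1 := by
      simp only [if_pos h]; omega
    rw [hcnt, if_neg h2]
    simp [List.range_succ]

theorem pvPyRange_two_nil (a b : Int) (h : b ≤ a) : PySem.List.pyRange a b 2 = [] := by
  rw [PySem.List.pyRange_of_pos a b (by norm_num), if_neg (by omega)]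
  simp

-- A's fold, processed two characters at a time
theorem pvA_fold (s pre acc : List Char) (hk : 2 ∣ pre.length) :
    (PySem.List.enumerate s (pre.length : Int)).foldl
      (fun ret ic =>
        if PySem.Int.mod ic.1 2 = 0 then ret ++ [ic.2]
        else
          match PySem.List.pyGet? (pre ++ s) (ic.1 - 1) with
          | some c => ret ++ [c]
          | none => ret)
      acc = acc ++ pvDbl s := by
  induction s using pvDbl.induct generalizing pre acc with
  | case1 => simp [PySem.List.enumerate_nil, pvDbl]
  | case2 a =>
    have hmod : PySem.Int.mod (pre.length : Int) 2 = 0 :=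
      (PySem.Int.mod_eq_zero_iff_dvd _ _).2 (by exact_mod_cast hk)
    rw [PySem.List.enumerate_cons, PySem.List.enumerate_nil]
    simp only [List.foldl_cons, List.foldl_nil, if_pos hmod, pvDbl]
  | case3 a b t ih =>
    have hmod : PySem.Int.mod (pre.length : Int) 2 = 0 :=
      (PySem.Int.mod_eq_zero_iff_dvd _ _).2 (by exact_mod_cast hk)
    have hmod1 : ¬ PySem.Int.mod ((pre.length : Int) + 1) 2 = 0 := by
      rw [PySem.Int.mod_eq_zero_iff_dvd]
      omega
    have hget : PySem.List.pyGet? (pre ++ a :: b :: t) ((pre.length : Int) + 1 - 1)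
        = some a := by
      have : (pre.length : Int) + 1 - 1 = ((pre.length : Nat) : Int) := by ring
      rw [this, PySem.List.pyGet?_natCast]
      simp
    rw [PySem.List.enumerate_cons, PySem.List.enumerate_cons]
    simp only [List.foldl_cons, if_pos hmod, if_neg hmod1, hget]
    have hpre : pre ++ a :: b :: t = (pre ++ [a, b]) ++ t := by simp
    have hlen : (pre.length : Int) + 1 + 1 = (((pre ++ [a, b]).length : Nat) : Int) := by
      push_cast [List.length_append, List.length_cons]; ring_nf; simp
    rw [hlen, hpre, ih (pre ++ [a, b]) _ (by simp; omega)]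
    simp [pvDbl]

-- B's pass over the even indices, processed two characters at a time
theorem pvB_flat (s pre : List Char) :
    (PySem.List.pyRange (pre.length : Int) ((pre.length : Int) + s.length) 2).flatMap
      (fun i => [PySem.List.pyGetD (pre ++ s) i ' ', PySem.List.pyGetD (pre ++ s) i ' '])
      = pvDblPairs s := by
  induction s using pvDblPairs.induct generalizing pre with
  | case1 => rw [pvPyRange_two_nil _ _ (by simp)]; rfl
  | case2 a =>
    rw [show (pre.length : Int) + ([a] : List Char).length = (pre.length : Int) + 1 by simp,
        pvPyRange_two_cons _ _ (by omega), pvPyRange_two_nil _ _ (by omega)]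
    have hget : PySem.List.pyGetD (pre ++ [a]) ((pre.length : Nat) : Int) ' ' = a := by
      rw [PySem.List.pyGetD_natCast]
      simp [List.getD]
    simp [hget, pvDblPairs]
  | case3 a b t ih =>
    have hlen : (pre.length : Int) + (a :: b :: t).length = (pre.length : Int) + 2 + t.length := by
      push_cast [List.length_cons]; ring
    rw [hlen, pvPyRange_two_cons _ _ (by omega)]
    have hget : PySem.List.pyGetD (pre ++ a :: b :: t) ((pre.length : Nat) : Int) ' ' = a := by
      rw [PySem.List.pyGetD_natCast]
      simp [List.getD]
    have hpre : pre ++ a :: b :: t = (pre ++ [a, b]) ++ t := by simp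
    have hlen2 : (pre.length : Int) + 2 = (((pre ++ [a, b]).length : Nat) : Int) := by
      push_cast [List.length_append, List.length_cons]; simp
    rw [List.flatMap_cons, hget, hlen2, hpre, ih (pre ++ [a, b])]
    rfl

-- ===== VERDICT (by name: the statement is the Claim_ definition above) =====
theorem double_other_spec : Claim_equal_double_other := by
  intro text _
  unfold Spec_double_other double_other double_other_alt
  have hA := pvA_fold text.toList [] [] (by simp)
  simp only [List.nil_append, Nat.cast_zero, List.length_nil] at hA
  rw [hA]
  have hfold := PySem.List.foldl_append_singleton_eq_map
    (fun i => [PySem.List.pyGetD text.toList i ' ', PySem.List.pyGetD text.toList i ' '])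
    (PySem.List.pyRange 0 (text.toList.length : Int) 2) []
  have hB := pvB_flat text.toList []
  simp only [List.nil_append, List.length_nil, Nat.cast_zero, zero_add] at hB
  rw [hfold]
  simp only [List.nil_append]
  rw [← List.flatMap_def, hB, pvDblPairs_take]
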